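-- pv_equiv track=rewrite | github.com/Massprod/leetcode-testing | leetcode_problems/p2656_maximum_sum_with_exactly_k_elements.py | maximize_sum
-- ===== SOURCE A (Python) =====
-- def maximize_sum(nums: list[int], k: int) -> int:
--     # working_sol (67.09%, 86.65%) -> (143ms, 16.50mb)  time: O(n + k) | space: O(1)
--     out: int = 0
--     max_val: int = max(nums)
--     while k:
--         out += max_val
--         max_val += 1
--         k -= 1
--     return out
-- ===== SOURCE B (Python) =====
-- def maximize_sum(nums: list[int], k: int) -> int:
--     # closed form: k copies of max, incremented 0..k-1 -> k*max + k*(k-1)//2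
--     return k * max(nums) + k * (k - 1) // 2
-- ===== Notes on version B (the rewrite author's own statement) =====
-- stated objective: simpler
-- what changed: replaces the k-step accumulation loop with the closed form k*max(nums) + k*(k-1)//2 (not measurably faster on the timing inputs, where n dominates)
-- outside the precondition, e.g. on maximize_sum([], 3): A raises ValueError, B raises ValueError; on maximize_sum([1], -1): A does not finish within the time limit, B returns 0
import Mathlib
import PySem

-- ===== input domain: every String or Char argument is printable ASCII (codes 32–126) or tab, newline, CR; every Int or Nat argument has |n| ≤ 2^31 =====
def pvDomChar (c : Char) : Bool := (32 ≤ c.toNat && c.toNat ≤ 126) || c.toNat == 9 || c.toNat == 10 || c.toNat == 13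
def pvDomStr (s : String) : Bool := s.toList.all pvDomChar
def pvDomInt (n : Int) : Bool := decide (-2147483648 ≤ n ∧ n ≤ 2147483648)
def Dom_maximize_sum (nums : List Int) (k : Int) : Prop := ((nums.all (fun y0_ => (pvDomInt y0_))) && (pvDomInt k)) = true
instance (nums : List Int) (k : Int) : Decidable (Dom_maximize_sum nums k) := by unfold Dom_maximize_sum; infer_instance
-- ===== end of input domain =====

-- B replaces A's k-step accumulation loop with the closed form k*max(nums) + k*(k-1)//2 (simpler: one arithmetic expression).


-- ===== PORT A =====
-- the while loop: runs k.toNat times (Pre_ guarantees 0 ≤ k; for k < 0 Python diverges, excluded)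
def maximize_sum_loop : Nat → Int → Int → Int
  | 0, out, _ => out
  | n + 1, out, max_val => maximize_sum_loop n (out + max_val) (max_val + 1)

def maximize_sum (nums : List Int) (k : Int) : Int :=
  match PySem.List.max? nums (fun x => x) with
  | none => 0          -- unreachable under Pre_ (Python raises ValueError on empty nums)
  | some max_val => maximize_sum_loop k.toNat 0 max_val

-- ===== PORT B =====
def maximize_sum_alt (nums : List Int) (k : Int) : Int :=
  match PySem.List.max? nums (fun x => x) with
  | none => 0          -- unreachable under Pre_ (Python raises ValueError on empty nums)
  | some m => k * m + PySem.Int.floordiv (k * (k - 1)) 2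

-- ===== PRECONDITION & SPEC =====
-- Pre_ excludes the empty list (max raises ValueError) and negative k (A's while loop never terminates).
def Pre_maximize_sum (nums : List Int) (k : Int) : Prop := nums ≠ [] ∧ 0 ≤ k
instance (nums : List Int) (k : Int) : Decidable (Pre_maximize_sum nums k) := by unfold Pre_maximize_sum; infer_instance
def pvWitness_maximize_sum : List Int × Int := ([3, -1, 5], 4)

def Spec_maximize_sum (nums : List Int) (k : Int) (out : Int) : Prop := out = maximize_sum_alt nums k
instance (nums : List Int) (k : Int) (out : Int) : Decidable (Spec_maximize_sum nums k out) := by unfold Spec_maximize_sum; infer_instance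

-- ===== CLAIM (what is proved, stated in full; the proofs are below) =====
def Claim_equal_maximize_sum : Prop := ∀ (nums : List Int) (k : Int), Dom_maximize_sum nums k → Pre_maximize_sum nums k → Spec_maximize_sum nums k (maximize_sum nums k)

-- ===== LEMMAS AND PROOFS =====
theorem maximize_sum_loop_closed (n : Nat) : ∀ (out m : Int),
    maximize_sum_loop n out m = out + n * m + ((n * (n - 1) / 2 : Nat) : Int) := by
  induction n with
  | zero => intro out m; simp [maximize_sum_loop]
  | succ n ih =>
    intro out m
    have gauss : (n + 1) * n / 2 = n + n * (n - 1) / 2 := by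
      rcases n with _ | p
      · simp
      · have h2 : (p + 1 + 1) * (p + 1) = (p + 1) * p + 2 * (p + 1) := by ring
        rw [h2, Nat.add_mul_div_left _ _ (by norm_num : 0 < 2)]
        simp [Nat.mul_comm]
        omega
    rw [maximize_sum_loop, ih]
    push_cast [gauss]
    ring

theorem floordiv_tri (n : Nat) :
    PySem.Int.floordiv ((n : Int) * ((n : Int) - 1)) 2 = ((n * (n - 1) / 2 : Nat) : Int) := by
  rcases n with _ | p
  · simp [PySem.Int.floordiv]
  · have h : ((p + 1 : Nat) : Int) * (((p + 1 : Nat) : Int) - 1) = (((p + 1) * p : Nat) : Int) := by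
      push_cast; ring
    rw [h]
    simp only [Nat.add_sub_cancel]
    exact_mod_cast PySem.Int.floordiv_natCast ((p + 1) * p) 2

-- ===== VERDICT (by name: the statement is the Claim_ definition above) =====
theorem maximize_sum_spec : Claim_equal_maximize_sum := by
  intro nums k _ hpre
  unfold Spec_maximize_sum maximize_sum maximize_sum_alt
  cases hmax : PySem.List.max? nums (fun x => x) with
  | none =>
    obtain ⟨x, t, rfl⟩ := List.exists_cons_of_ne_nil hpre.1
    rw [PySem.List.max?_id_cons] at hmax
  | some m =>
    show maximize_sum_loop k.toNat 0 m = k * m + PySem.Int.floordiv (k * (k - 1)) 2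
    rw [maximize_sum_loop_closed]
    have hk : (k.toNat : Int) = k := Int.toNat_of_nonneg hpre.2
    rw [show k * (k - 1) = (k.toNat : Int) * ((k.toNat : Int) - 1) from by rw [hk],
        floordiv_tri, hk]
    ring
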